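-- pv_equiv track=rewrite | github.com/creepereye1204/TIL | Algorithm/프로그래머스/구현/Level2/이모티콘 할인행사/code.py | solution
-- ===== SOURCE A (Python) =====
-- from itertools import product
--
-- def solution(users, emoticons):
--     answer=[0,0]
--     E=len(emoticons)
--     prod=(10,20,30,40)
--     for discounts in product(prod,repeat=E):
--         user_cnt = total_price = 0
--         for user_d,user_p in users:
--             user_price=0
--             for emoticon,discount in zip(emoticons,discounts):
--                 if user_d<=discount:
--                     user_price+=emoticon*(100-discount)//100
--
--             if user_p<=user_price:
--                 user_cnt+=1
--             else:
--                 total_price+=user_price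
--         answer=max(answer,[user_cnt,total_price])
--
--     return answer
-- ===== SOURCE B (Python) =====
-- def solution(users, emoticons):
--     answer = [0, 0]
--     E = len(emoticons)
--
--     def dfs(i, prices):
--         nonlocal answer
--         if i == E:
--             user_cnt = 0
--             total_price = 0
--             for (user_d, user_p), price in zip(users, prices):
--                 if user_p <= price:
--                     user_cnt += 1
--                 else:
--                     total_price += price
--             answer = max(answer, [user_cnt, total_price])
--             return
--         e = emoticons[i]
--         for discount in (10, 20, 30, 40):
--             dfs(i + 1, [p + e * (100 - discount) // 100 if user_d <= discount else p
--                         for (user_d, _), p in zip(users, prices)])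
--
--     dfs(0, [0] * len(users))
--     return answer
-- ===== Notes on version B (the rewrite author's own statement) =====
-- stated objective: alternative
-- what changed: Replaced the itertools.product double loop that recomputes every user's price from scratch per assignment with a DFS over the emoticon index carrying each user's accumulated price, so each leaf is a single pass over users (fewer operations per leaf, not measurable in a timing run).
import Mathlib
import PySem

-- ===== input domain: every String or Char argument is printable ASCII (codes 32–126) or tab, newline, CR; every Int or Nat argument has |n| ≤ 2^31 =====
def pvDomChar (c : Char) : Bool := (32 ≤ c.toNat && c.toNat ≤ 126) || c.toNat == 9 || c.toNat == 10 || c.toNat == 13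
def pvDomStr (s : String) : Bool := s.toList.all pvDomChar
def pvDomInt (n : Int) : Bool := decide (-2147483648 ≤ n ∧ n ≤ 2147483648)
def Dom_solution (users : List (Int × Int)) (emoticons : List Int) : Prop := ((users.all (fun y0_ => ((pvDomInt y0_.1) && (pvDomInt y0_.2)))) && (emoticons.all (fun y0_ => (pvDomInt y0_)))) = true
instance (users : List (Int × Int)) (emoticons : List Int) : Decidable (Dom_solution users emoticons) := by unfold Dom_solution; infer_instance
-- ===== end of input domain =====

-- B replaces A's itertools.product enumeration (recomputing every user's price from scratch
-- at each assignment) with a DFS over the emoticon index that carries each user's accumulated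
-- price, so each leaf only scans the users once (objective: alternative decomposition with
-- less work per leaf).

-- Shared helper: Python's lexicographic list comparison (max(a,b) returns b iff a < b)
def pyListLt : List Int → List Int → Bool
  | _, [] => false
  | [], _ :: _ => true
  | a :: as, b :: bs => if a < b then true else if b < a then false else pyListLt as bs

def pyListMax (x y : List Int) : List Int := if pyListLt x y then y else x

-- ===== PORT A =====
-- itertools.product((10,20,30,40), repeat=E), in product order (last position fastest)
def tuplesA : Nat → List (List Int)
  | 0 => [[]]
  | n + 1 => ([10, 20, 30, 40] : List Int).flatMap (fun d => (tuplesA n).map (fun t => d :: t))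

-- the inner 'for emoticon,discount in zip(...)' loop accumulating user_price
def userPriceA (emoticons discounts : List Int) (user_d : Int) : Int :=
  (emoticons.zip discounts).foldl
    (fun acc ed => if user_d ≤ ed.2 then acc + PySem.Int.floordiv (ed.1 * (100 - ed.2)) 100 else acc) 0

-- the 'for user_d,user_p in users' loop producing [user_cnt, total_price]
def scoreA (users : List (Int × Int)) (emoticons discounts : List Int) : List Int :=
  let r := users.foldl
      (fun (ct : Int × Int) u =>
        let up := userPriceA emoticons discounts u.1
        if u.2 ≤ up then (ct.1 + 1, ct.2) else (ct.1, ct.2 + up)) (0, 0)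
  [r.1, r.2]

def solution (users : List (Int × Int)) (emoticons : List Int) : List Int :=
  (tuplesA emoticons.length).foldl (fun ans ds => pyListMax ans (scoreA users emoticons ds)) [0, 0]

-- ===== PORT B =====
-- one DFS step: per-user price update for emoticon e at discount d
def updB (users : List (Int × Int)) (prices : List Int) (e d : Int) : List Int :=
  (users.zip prices).map
    (fun up => if up.1.1 ≤ d then up.2 + PySem.Int.floordiv (e * (100 - d)) 100 else up.2)

-- leaf: one pass over users with their accumulated prices
def leafB (users : List (Int × Int)) (prices : List Int) : List Int :=
  let r := (users.zip prices).foldl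
      (fun (ct : Int × Int) up =>
        if up.1.2 ≤ up.2 then (ct.1 + 1, ct.2) else (ct.1, ct.2 + up.2)) (0, 0)
  [r.1, r.2]

def dfsB (users : List (Int × Int)) : List Int → List Int → List Int → List Int
  | [], prices, ans => pyListMax ans (leafB users prices)
  | e :: rest, prices, ans =>
      ([10, 20, 30, 40] : List Int).foldl (fun a d => dfsB users rest (updB users prices e d) a) ans

def solution_alt (users : List (Int × Int)) (emoticons : List Int) : List Int :=
  dfsB users emoticons (users.map (fun _ => 0)) [0, 0]

-- ===== PRECONDITION & SPEC =====
def Spec_solution (users : List (Int × Int)) (emoticons : List Int) (out : List Int) : Prop := out = solution_alt users emoticons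
instance (users : List (Int × Int)) (emoticons : List Int) (out : List Int) : Decidable (Spec_solution users emoticons out) := by unfold Spec_solution; infer_instance

-- ===== CLAIM (what is proved, stated in full; the proofs are below) =====
def Claim_equal_solution : Prop := ∀ (users : List (Int × Int)) (emoticons : List Int), Dom_solution users emoticons → Spec_solution users emoticons (solution users emoticons)

-- ===== LEMMAS AND PROOFS =====

-- accumulated prices after processing all of emos under discounts ds, starting from prices
def accP (users : List (Int × Int)) (prices : List Int) : List Int → List Int → List Int
  | [], _ => prices
  | _ :: _, [] => prices
  | e :: es, d :: ds => accP users (updB users prices e d) es ds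

theorem foldl_congr' {α β : Type} (l : List α) (f g : β → α → β) (a : β)
    (h : ∀ b x, x ∈ l → f b x = g b x) : l.foldl f a = l.foldl g a := by
  induction l generalizing a with
  | nil => rfl
  | cons x xs ih => simp only [List.foldl_cons, h a x (by simp)]; exact ih _ (fun b y hy => h b y (by simp [hy]))

theorem foldl_flatMap' {α β γ : Type} (g : α → List β) (f : γ → β → γ) (l : List α) (a : γ) :
    (l.flatMap g).foldl f a = l.foldl (fun a x => (g x).foldl f a) a := by
  induction l generalizing a with
  | nil => rfl
  | cons x xs ih => simp [List.flatMap_cons, List.foldl_append, ih]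

theorem zip_map_zip {α β : Type} (h : α × β → β) :
    ∀ (users : List α) (prices : List β),
      users.zip ((users.zip prices).map h) = (users.zip prices).map (fun up => (up.1, h up))
  | [], _ => rfl
  | _ :: _, [] => rfl
  | u :: us, p :: ps => by simp [List.zip_cons_cons, zip_map_zip h us ps]

theorem updB_eq (users : List (Int × Int)) (prices : List Int) (e d : Int) :
    users.zip (updB users prices e d)
      = (users.zip prices).map
          (fun up => (up.1, if up.1.1 ≤ d then up.2 + PySem.Int.floordiv (e * (100 - d)) 100 else up.2)) := by
  simpa [updB] using zip_map_zip
    (fun up : (Int × Int) × Int => if up.1.1 ≤ d then up.2 + PySem.Int.floordiv (e * (100 - d)) 100 else up.2) users prices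

theorem userPriceA_shift (emos ds : List Int) (ud : Int) (a : Int) :
    (emos.zip ds).foldl
      (fun acc ed => if ud ≤ ed.2 then acc + PySem.Int.floordiv (ed.1 * (100 - ed.2)) 100 else acc) a
    = a + userPriceA emos ds ud := by
  unfold userPriceA
  generalize emos.zip ds = l
  induction l generalizing a with
  | nil => simp
  | cons x xs ih =>
      simp only [List.foldl_cons]
      rw [ih, ih (if ud ≤ x.2 then 0 + PySem.Int.floordiv (x.1 * (100 - x.2)) 100 else 0)]
      split <;> ring

theorem userPriceA_cons (e d : Int) (es ds : List Int) (ud : Int) :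
    userPriceA (e :: es) (d :: ds) ud
      = (if ud ≤ d then PySem.Int.floordiv (e * (100 - d)) 100 else 0) + userPriceA es ds ud := by
  show (((e, d) :: es.zip ds).foldl _ 0) = _
  rw [List.foldl_cons, userPriceA_shift]
  split <;> simp

theorem userPriceA_nil_ds (emos : List Int) (ud : Int) : userPriceA emos [] ud = 0 := by
  cases emos <;> rfl

-- accP unrolls to a per-user closed form over the initial (user, price) pairs
theorem accP_eq (users : List (Int × Int)) :
    ∀ (emos ds : List Int) (prices : List Int),
      users.zip (accP users prices emos ds)
        = (users.zip prices).map (fun up => (up.1, up.2 + userPriceA emos ds up.1.1))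
  | [], ds, prices => by
      simp [accP, userPriceA]
  | e :: es, [], prices => by
      simp [accP, userPriceA_nil_ds]
  | e :: es, d :: ds, prices => by
      rw [accP, accP_eq users es ds (updB users prices e d), updB_eq]
      rw [List.map_map]
      apply List.map_congr_left
      intro up _
      simp only [Function.comp]
      rw [userPriceA_cons]
      split <;> ring_nf

-- the main DFS invariant
theorem dfsB_eq (users : List (Int × Int)) :
    ∀ (emos : List Int) (prices ans : List Int),
      dfsB users emos prices ans
        = (tuplesA emos.length).foldl
            (fun a ds => pyListMax a (leafB users (accP users prices emos ds))) ans
  | [], prices, ans => by simp [dfsB, tuplesA, accP]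
  | e :: es, prices, ans => by
      simp only [dfsB, List.length_cons, tuplesA]
      rw [foldl_flatMap']
      apply foldl_congr'
      intro a d _
      rw [List.foldl_map, dfsB_eq users es (updB users prices e d) a]
      rfl

theorem zip_zeros (users : List (Int × Int)) :
    users.zip (users.map (fun _ => (0 : Int))) = users.map (fun u => (u, (0 : Int))) := by
  induction users with
  | nil => rfl
  | cons u us ih => simp only [List.map_cons, List.zip_cons_cons, ih]

theorem leaf_acc_eq_score (users : List (Int × Int)) (emos ds : List Int) :
    leafB users (accP users (users.map (fun _ => 0)) emos ds) = scoreA users emos ds := by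
  unfold leafB scoreA
  rw [accP_eq, zip_zeros, List.map_map, List.foldl_map]
  refine congrArg (fun r : Int × Int => [r.1, r.2]) (foldl_congr' _ _ _ _ ?_)
  intro ct u _
  simp [Function.comp]

-- ===== VERDICT (by name: the statement is the Claim_ definition above) =====
theorem solution_spec : Claim_equal_solution := by
  intro users emoticons _
  unfold Spec_solution solution solution_alt
  rw [dfsB_eq]
  apply foldl_congr'
  intro a ds _
  rw [leaf_acc_eq_score]
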